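-- pv_equiv track=rewrite | github.com/johnny-papercut/fantasy | helpers.py | translate_team
-- ===== SOURCE A (Python) =====
-- def translate_team(input: str, output: str, team_name: str) -> str:
--
--     teams = [
--         {'espn': 'WSH', 'sleeper': 'WAS', 'fp': 'WAS', 'nfl': 'WSH'},
--         {'espn': 'JAX', 'sleeper': 'JAX', 'fp': 'JAC', 'nfl': 'JAX'},
--         {'espn': 'OAK', 'sleeper': 'LV', 'fp': 'LV', 'nfl': 'LV'},
--     ]
--
--     if not team_name:
--         return ''
--
--     for team in teams:
--         if team.get(input) == team_name:
--             return team.get(output)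
--
--     return team_name
-- ===== SOURCE B (Python) =====
-- def translate_team(input: str, output: str, team_name: str) -> str:
--
--     teams = [
--         {'espn': 'WSH', 'sleeper': 'WAS', 'fp': 'WAS', 'nfl': 'WSH'},
--         {'espn': 'JAX', 'sleeper': 'JAX', 'fp': 'JAC', 'nfl': 'JAX'},
--         {'espn': 'OAK', 'sleeper': 'LV', 'fp': 'LV', 'nfl': 'LV'},
--     ]
--
--     if not team_name:
--         return ''
--
--     index = {(system, name): row for row in teams for system, name in row.items()}
--     row = index.get((input, team_name))
--     return row[output] if row is not None else team_name
-- ===== Notes on version B (the rewrite author's own statement) =====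
-- stated objective: simpler
-- what changed: Replaces the linear scan over the list of team dicts with a single (system, team_value)->row index built once by a dict comprehension, followed by one direct lookup.
-- outside the precondition, e.g. on translate_team('espn', 'x', 'WSH'): A returns None, B raises KeyError
import Mathlib
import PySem

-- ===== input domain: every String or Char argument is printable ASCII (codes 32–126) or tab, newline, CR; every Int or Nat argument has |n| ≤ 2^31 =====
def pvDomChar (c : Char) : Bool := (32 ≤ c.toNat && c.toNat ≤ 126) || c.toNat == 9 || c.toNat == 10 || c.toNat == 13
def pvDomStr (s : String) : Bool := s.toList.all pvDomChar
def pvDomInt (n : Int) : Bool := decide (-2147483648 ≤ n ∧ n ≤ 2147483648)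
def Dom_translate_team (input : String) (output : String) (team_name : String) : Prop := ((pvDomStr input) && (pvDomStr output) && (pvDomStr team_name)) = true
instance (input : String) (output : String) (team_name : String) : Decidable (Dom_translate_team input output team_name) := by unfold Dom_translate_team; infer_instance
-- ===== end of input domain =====

-- B replaces A's linear scan over the team rows with a (system, value) → row index built
-- once by a dict comprehension and a single lookup (objective: simpler).

-- the literal team table, shared verbatim by both Pythons
def pvTeams : List (PySem.Dict String String) :=
  [ PySem.Dict.ofList [("espn", "WSH"), ("sleeper", "WAS"), ("fp", "WAS"), ("nfl", "WSH")],
    PySem.Dict.ofList [("espn", "JAX"), ("sleeper", "JAX"), ("fp", "JAC"), ("nfl", "JAX")],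
    PySem.Dict.ofList [("espn", "OAK"), ("sleeper", "LV"), ("fp", "LV"), ("nfl", "LV")] ]

-- ===== PORT A =====
-- the for-loop with its early returns; 'team.get(output)' can be None in Python —
-- those inputs are outside Pre_translate_team, so '.getD ""' is exact on the admitted domain
def translate_team_loop (input : String) (output : String) (team_name : String) :
    List (PySem.Dict String String) → String
  | [] => team_name
  | team :: rest =>
      if team.get? input == some team_name then (team.get? output).getD ""
      else translate_team_loop input output team_name rest

def translate_team (input : String) (output : String) (team_name : String) : String :=
  if team_name = "" then ""
  else translate_team_loop input output team_name pvTeams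

-- ===== PORT B =====
-- the dict comprehension {(system, name): row for row in teams for system, name in row.items()}
def pvIndexB : PySem.Dict (String × String) (PySem.Dict String String) :=
  pvTeams.foldl
    (fun d row => row.items.foldl (fun d2 kv => d2.insert (kv.1, kv.2) row) d)
    PySem.Dict.empty

def translate_team_alt (input : String) (output : String) (team_name : String) : String :=
  if team_name = "" then ""
  else
    match pvIndexB.get? (input, team_name) with
    | some row => (row.get? output).getD ""   -- row[output]; the KeyError inputs are outside Pre_
    | none => team_name

-- ===== PRECONDITION & SPEC =====
-- Pre_ excludes inputs where a team row matches (input, team_name) but output is not one of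
-- the four system keys: there A returns None (not a str) and B raises KeyError.
def Pre_translate_team (input : String) (output : String) (team_name : String) : Prop :=
  team_name = "" ∨ output ∈ ["espn", "sleeper", "fp", "nfl"] ∨
    (input, team_name) ∉
      [("espn", "WSH"), ("sleeper", "WAS"), ("fp", "WAS"), ("nfl", "WSH"),
       ("espn", "JAX"), ("sleeper", "JAX"), ("fp", "JAC"), ("nfl", "JAX"),
       ("espn", "OAK"), ("sleeper", "LV"), ("fp", "LV"), ("nfl", "LV")]
instance (input : String) (output : String) (team_name : String) :
    Decidable (Pre_translate_team input output team_name) := by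
  unfold Pre_translate_team; infer_instance

def pvWitness_translate_team : String × String × String := ("espn", "sleeper", "WSH")

def Spec_translate_team (input : String) (output : String) (team_name : String) (out : String) : Prop := out = translate_team_alt input output team_name
instance (input : String) (output : String) (team_name : String) (out : String) : Decidable (Spec_translate_team input output team_name out) := by unfold Spec_translate_team; infer_instance

-- ===== CLAIM (what is proved, stated in full; the proofs are below) =====
def Claim_equal_translate_team : Prop := ∀ (input : String) (output : String) (team_name : String), Dom_translate_team input output team_name → Pre_translate_team input output team_name → Spec_translate_team input output team_name (translate_team input output team_name)

-- ===== LEMMAS AND PROOFS =====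

-- the three rows as plain literals
def pvRow1 : PySem.Dict String String :=
  PySem.Dict.mk [("espn", "WSH"), ("sleeper", "WAS"), ("fp", "WAS"), ("nfl", "WSH")]
def pvRow2 : PySem.Dict String String :=
  PySem.Dict.mk [("espn", "JAX"), ("sleeper", "JAX"), ("fp", "JAC"), ("nfl", "JAX")]
def pvRow3 : PySem.Dict String String :=
  PySem.Dict.mk [("espn", "OAK"), ("sleeper", "LV"), ("fp", "LV"), ("nfl", "LV")]

theorem pvTeams_eq : pvTeams = [pvRow1, pvRow2, pvRow3] := by decide

theorem pvIndexB_eq :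
    pvIndexB = PySem.Dict.mk
      [(("espn", "WSH"), pvRow1), (("sleeper", "WAS"), pvRow1),
       (("fp", "WAS"), pvRow1), (("nfl", "WSH"), pvRow1),
       (("espn", "JAX"), pvRow2), (("sleeper", "JAX"), pvRow2),
       (("fp", "JAC"), pvRow2), (("nfl", "JAX"), pvRow2),
       (("espn", "OAK"), pvRow3), (("sleeper", "LV"), pvRow3),
       (("fp", "LV"), pvRow3), (("nfl", "LV"), pvRow3)] := by decide

theorem translate_team_eq_alt (input output team_name : String) :
    translate_team input output team_name = translate_team_alt input output team_name := by
  unfold translate_team translate_team_alt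
  by_cases h0 : team_name = ""
  · simp [h0]
  · simp only [if_neg h0, pvTeams_eq, pvIndexB_eq]
    by_cases h1 : input = "espn"
    · subst h1
      by_cases t0 : "WSH" = team_name
      · subst t0; simp_all [translate_team_loop, pvRow1, pvRow2, pvRow3, PySem.Dict.get?, List.find?_cons_of_pos, List.find?_cons_of_neg, List.find?_nil, beq_iff_eq, Prod.mk.injEq]
      ·
        by_cases t1 : "JAX" = team_name
        · subst t1; simp_all [translate_team_loop, pvRow1, pvRow2, pvRow3, PySem.Dict.get?, List.find?_cons_of_pos, List.find?_cons_of_neg, List.find?_nil, beq_iff_eq, Prod.mk.injEq]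
        ·
          by_cases t2 : "OAK" = team_name
          · subst t2; simp_all [translate_team_loop, pvRow1, pvRow2, pvRow3, PySem.Dict.get?, List.find?_cons_of_pos, List.find?_cons_of_neg, List.find?_nil, beq_iff_eq, Prod.mk.injEq]
          ·
            simp_all [translate_team_loop, pvRow1, pvRow2, pvRow3, PySem.Dict.get?, List.find?_cons_of_pos, List.find?_cons_of_neg, List.find?_nil, beq_iff_eq, Prod.mk.injEq]
    ·
      by_cases h2 : input = "sleeper"
      · subst h2
        by_cases t0 : "WAS" = team_name
        · subst t0; simp_all [translate_team_loop, pvRow1, pvRow2, pvRow3, PySem.Dict.get?, List.find?_cons_of_pos, List.find?_cons_of_neg, List.find?_nil, beq_iff_eq, Prod.mk.injEq]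
        ·
          by_cases t1 : "JAX" = team_name
          · subst t1; simp_all [translate_team_loop, pvRow1, pvRow2, pvRow3, PySem.Dict.get?, List.find?_cons_of_pos, List.find?_cons_of_neg, List.find?_nil, beq_iff_eq, Prod.mk.injEq]
          ·
            by_cases t2 : "LV" = team_name
            · subst t2; simp_all [translate_team_loop, pvRow1, pvRow2, pvRow3, PySem.Dict.get?, List.find?_cons_of_pos, List.find?_cons_of_neg, List.find?_nil, beq_iff_eq, Prod.mk.injEq]
            ·
              simp_all [translate_team_loop, pvRow1, pvRow2, pvRow3, PySem.Dict.get?, List.find?_cons_of_pos, List.find?_cons_of_neg, List.find?_nil, beq_iff_eq, Prod.mk.injEq]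
      ·
        by_cases h3 : input = "fp"
        · subst h3
          by_cases t0 : "WAS" = team_name
          · subst t0; simp_all [translate_team_loop, pvRow1, pvRow2, pvRow3, PySem.Dict.get?, List.find?_cons_of_pos, List.find?_cons_of_neg, List.find?_nil, beq_iff_eq, Prod.mk.injEq]
          ·
            by_cases t1 : "JAC" = team_name
            · subst t1; simp_all [translate_team_loop, pvRow1, pvRow2, pvRow3, PySem.Dict.get?, List.find?_cons_of_pos, List.find?_cons_of_neg, List.find?_nil, beq_iff_eq, Prod.mk.injEq]
            ·
              by_cases t2 : "LV" = team_name
              · subst t2; simp_all [translate_team_loop, pvRow1, pvRow2, pvRow3, PySem.Dict.get?, List.find?_cons_of_pos, List.find?_cons_of_neg, List.find?_nil, beq_iff_eq, Prod.mk.injEq]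
              ·
                simp_all [translate_team_loop, pvRow1, pvRow2, pvRow3, PySem.Dict.get?, List.find?_cons_of_pos, List.find?_cons_of_neg, List.find?_nil, beq_iff_eq, Prod.mk.injEq]
        ·
          by_cases h4 : input = "nfl"
          · subst h4
            by_cases t0 : "WSH" = team_name
            · subst t0; simp_all [translate_team_loop, pvRow1, pvRow2, pvRow3, PySem.Dict.get?, List.find?_cons_of_pos, List.find?_cons_of_neg, List.find?_nil, beq_iff_eq, Prod.mk.injEq]
            ·
              by_cases t1 : "JAX" = team_name
              · subst t1; simp_all [translate_team_loop, pvRow1, pvRow2, pvRow3, PySem.Dict.get?, List.find?_cons_of_pos, List.find?_cons_of_neg, List.find?_nil, beq_iff_eq, Prod.mk.injEq]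
              ·
                by_cases t2 : "LV" = team_name
                · subst t2; simp_all [translate_team_loop, pvRow1, pvRow2, pvRow3, PySem.Dict.get?, List.find?_cons_of_pos, List.find?_cons_of_neg, List.find?_nil, beq_iff_eq, Prod.mk.injEq]
                ·
                  simp_all [translate_team_loop, pvRow1, pvRow2, pvRow3, PySem.Dict.get?, List.find?_cons_of_pos, List.find?_cons_of_neg, List.find?_nil, beq_iff_eq, Prod.mk.injEq]
          ·
            have g1 : ¬"espn" = input := fun h => h1 h.symm
            have g2 : ¬"sleeper" = input := fun h => h2 h.symm
            have g3 : ¬"fp" = input := fun h => h3 h.symm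
            have g4 : ¬"nfl" = input := fun h => h4 h.symm
            simp_all [translate_team_loop, pvRow1, pvRow2, pvRow3, PySem.Dict.get?, List.find?_cons_of_pos, List.find?_cons_of_neg, List.find?_nil, beq_iff_eq, Prod.mk.injEq]

-- ===== VERDICT (by name: the statement is the Claim_ definition above) =====
theorem translate_team_spec : Claim_equal_translate_team := by
  intro input output team_name _ _
  exact translate_team_eq_alt input output team_name
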